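-- pv_equiv track=rewrite | github.com/SanCriolloB/NeuroCampus | backend/src/neurocampus/dashboard/queries.py | _augment_columns_for_aliases
-- ===== SOURCE A (Python) =====
-- from typing import Iterable, List, Optional, Tuple
--
-- def _augment_columns_for_aliases(columns: Optional[List[str]]) -> Optional[List[str]]:
--     """Aumenta `columns` para soportar creación de alias de dimensiones.
--
--     Cuando un caller pide columnas canónicas (p.ej. ``docente``), pero el parquet
--     contiene el nombre alternativo (p.ej. ``profesor``), necesitamos leer también
--     la columna fuente para poder generar el alias.
--
--     La función es conservadora: si `columns` es None, no hace nada.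
--     """
--     if columns is None:
--         return None
--
--     wanted = {str(c) for c in columns}
--
--     # Dimensiones canónicas -> posibles alias históricos.
--     if "docente" in wanted:
--         wanted.add("profesor")
--         wanted.add("docente_nombre")
--         wanted.add("nombre_docente")
--     if "asignatura" in wanted:
--         wanted.add("materia")
--         wanted.add("asignatura_nombre")
--         wanted.add("nombre_asignatura")
--     if "programa" in wanted:
--         wanted.add("programa_nombre")
--         wanted.add("nombre_programa")
--
--     # Orden determinista.
--     return sorted(wanted)
-- ===== SOURCE B (Python) =====
-- from typing import Iterable, List, Optional, Tuple
--
-- _ALIAS_TABLE = (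
--     ("docente", ("profesor", "docente_nombre", "nombre_docente")),
--     ("asignatura", ("materia", "asignatura_nombre", "nombre_asignatura")),
--     ("programa", ("programa_nombre", "nombre_programa")),
-- )
--
-- def _dedupe_sorted(xs):
--     """Drop adjacent duplicates of a sorted list."""
--     out = []
--     for x in xs:
--         if not out or x != out[-1]:
--             out.append(x)
--     return out
--
-- def _merge_unique(a, b):
--     """Two-pointer merge of two strictly increasing lists, dropping common elements."""
--     i = j = 0
--     out = []
--     while i < len(a) and j < len(b):
--         if a[i] < b[j]:
--             out.append(a[i]); i += 1
--         elif b[j] < a[i]: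
--             out.append(b[j]); j += 1
--         else:
--             out.append(a[i]); i += 1; j += 1
--     out.extend(a[i:])
--     out.extend(b[j:])
--     return out
--
-- def _augment_columns_for_aliases(columns: Optional[List[str]]) -> Optional[List[str]]:
--     if columns is None:
--         return None
--     base = _dedupe_sorted(sorted(str(c) for c in columns))
--     extras = sorted(
--         alias
--         for canonical, aliases in _ALIAS_TABLE
--         if canonical in base
--         for alias in aliases
--     )
--     return _merge_unique(base, extras)
-- ===== Notes on version B (the rewrite author's own statement) =====
-- stated objective: alternative
-- what changed: B uses no set: it sorts the columns, removes adjacent duplicates by structural recursion, sorts the triggered alias names, and produces the result by a sorted-merge of the two strictly increasing lists, instead of A's build-a-set-then-sort.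
import Mathlib
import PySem

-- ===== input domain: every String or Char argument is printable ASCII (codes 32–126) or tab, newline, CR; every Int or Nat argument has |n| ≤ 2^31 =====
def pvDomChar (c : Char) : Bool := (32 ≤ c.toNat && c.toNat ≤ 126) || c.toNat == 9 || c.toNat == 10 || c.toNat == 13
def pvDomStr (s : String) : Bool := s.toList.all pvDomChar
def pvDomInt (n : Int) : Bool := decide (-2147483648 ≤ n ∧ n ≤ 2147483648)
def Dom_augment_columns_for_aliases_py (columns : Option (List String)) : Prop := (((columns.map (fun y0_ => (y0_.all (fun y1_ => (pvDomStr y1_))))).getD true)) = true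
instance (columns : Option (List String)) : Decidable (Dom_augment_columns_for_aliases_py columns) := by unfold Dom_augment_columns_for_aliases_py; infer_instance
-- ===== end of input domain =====

-- B avoids the set entirely: sort + adjacent-dedup + sorted-merge of the alias block (alternative algorithm, same cost).

-- ===== PORT A =====
def augment_columns_for_aliases_py (columns : Option (List String)) : Option (List String) :=
  match columns with
  | none => none
  | some cols =>
    let wanted : PySem.Set String := PySem.Set.ofList cols
    let wanted :=
      if "docente" ∈ wanted then
        PySem.Set.add (PySem.Set.add (PySem.Set.add wanted "profesor") "docente_nombre") "nombre_docente"
      else wanted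
    let wanted :=
      if "asignatura" ∈ wanted then
        PySem.Set.add (PySem.Set.add (PySem.Set.add wanted "materia") "asignatura_nombre") "nombre_asignatura"
      else wanted
    let wanted :=
      if "programa" ∈ wanted then
        PySem.Set.add (PySem.Set.add wanted "programa_nombre") "nombre_programa"
      else wanted
    some (PySem.List.sorted wanted (fun x => x) false)

-- ===== PORT B =====
def pvAliasTable : List (String × List String) :=
  [("docente", ["profesor", "docente_nombre", "nombre_docente"]),
   ("asignatura", ["materia", "asignatura_nombre", "nombre_asignatura"]),
   ("programa", ["programa_nombre", "nombre_programa"])]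

def pvDedupeSorted : List String → List String
  | [] => []
  | x :: y :: t => if x = y then pvDedupeSorted (y :: t) else x :: pvDedupeSorted (y :: t)
  | [x] => [x]

def pvMergeUnique : List String → List String → List String
  | [], b => b
  | a, [] => a
  | x :: xs, y :: ys =>
    if x < y then x :: pvMergeUnique xs (y :: ys)
    else if y < x then y :: pvMergeUnique (x :: xs) ys
    else x :: pvMergeUnique xs ys

def augment_columns_for_aliases_py_alt (columns : Option (List String)) : Option (List String) :=
  match columns with
  | none => none
  | some cols =>
    let base := pvDedupeSorted (PySem.List.sorted cols (fun x => x) false)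
    let extras := PySem.List.sorted
      (pvAliasTable.foldl (fun acc kv => if kv.1 ∈ base then acc ++ kv.2 else acc) [])
      (fun x => x) false
    some (pvMergeUnique base extras)

-- ===== PRECONDITION & SPEC =====
def Spec_augment_columns_for_aliases_py (columns : Option (List String)) (out : Option (List String)) : Prop := out = augment_columns_for_aliases_py_alt columns
instance (columns : Option (List String)) (out : Option (List String)) : Decidable (Spec_augment_columns_for_aliases_py columns out) := by unfold Spec_augment_columns_for_aliases_py; infer_instance

-- ===== CLAIM (what is proved, stated in full; the proofs are below) =====
def Claim_equal_augment_columns_for_aliases_py : Prop := ∀ (columns : Option (List String)), Dom_augment_columns_for_aliases_py columns → Spec_augment_columns_for_aliases_py columns (augment_columns_for_aliases_py columns)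

-- ===== LEMMAS AND PROOFS =====

theorem mem_pvMergeUnique (a b : List String) (z : String) :
    z ∈ pvMergeUnique a b ↔ z ∈ a ∨ z ∈ b := by
  fun_induction pvMergeUnique a b with
  | case1 b => simp [pvMergeUnique]
  | case2 a h => simp [pvMergeUnique]
  | case3 x xs y ys hlt ih =>
      simp only [List.mem_cons, ih]; tauto
  | case4 x xs y ys hlt hgt ih =>
      simp only [List.mem_cons, ih]; tauto
  | case5 x xs y ys hlt hgt ih =>
      have hxy : x = y := le_antisymm (not_lt.1 hgt) (not_lt.1 hlt)
      simp only [List.mem_cons, ih]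
      subst hxy; tauto

theorem pairwise_pvMergeUnique (a b : List String)
    (ha : a.Pairwise (· < ·)) (hb : b.Pairwise (· < ·)) :
    (pvMergeUnique a b).Pairwise (· < ·) := by
  fun_induction pvMergeUnique a b with
  | case1 b => exact hb
  | case2 a h => exact ha
  | case3 x xs y ys hlt ih =>
      refine List.Pairwise.cons ?_ (ih ha.of_cons hb)
      intro z hz
      rcases (mem_pvMergeUnique _ _ _).1 hz with hz | hz
      · exact (List.pairwise_cons.1 ha).1 z hz
      · rcases List.mem_cons.1 hz with rfl | hz
        · exact hlt
        · exact lt_trans hlt ((List.pairwise_cons.1 hb).1 z hz)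
  | case4 x xs y ys hlt hgt ih =>
      refine List.Pairwise.cons ?_ (ih ha hb.of_cons)
      intro z hz
      rcases (mem_pvMergeUnique _ _ _).1 hz with hz | hz
      · rcases List.mem_cons.1 hz with rfl | hz
        · exact hgt
        · exact lt_trans hgt ((List.pairwise_cons.1 ha).1 z hz)
      · exact (List.pairwise_cons.1 hb).1 z hz
  | case5 x xs y ys hlt hgt ih =>
      have hxy : x = y := le_antisymm (not_lt.1 hgt) (not_lt.1 hlt)
      refine List.Pairwise.cons ?_ (ih ha.of_cons hb.of_cons)
      intro z hz
      rcases (mem_pvMergeUnique _ _ _).1 hz with hz | hz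
      · exact (List.pairwise_cons.1 ha).1 z hz
      · exact hxy ▸ (List.pairwise_cons.1 hb).1 z hz

theorem mem_pvDedupeSorted (xs : List String) (z : String) :
    z ∈ pvDedupeSorted xs ↔ z ∈ xs := by
  fun_induction pvDedupeSorted xs with
  | case1 => simp
  | case2 y t ih =>
      simp only [ih, List.mem_cons]; tauto
  | case3 x y t hne ih =>
      simp only [List.mem_cons, ih]
  | case4 x => simp

theorem pairwise_pvDedupeSorted (xs : List String) (h : xs.Pairwise (· ≤ ·)) :
    (pvDedupeSorted xs).Pairwise (· < ·) := by
  fun_induction pvDedupeSorted xs with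
  | case1 => simp
  | case2 y t ih =>
      exact ih h.of_cons
  | case3 x y t hne ih =>
      refine List.Pairwise.cons ?_ (ih h.of_cons)
      intro z hz
      have hz' : z ∈ y :: t := (mem_pvDedupeSorted _ _).1 hz
      have hxz : x ≤ z := (List.pairwise_cons.1 h).1 z hz'
      rcases List.mem_cons.1 hz' with rfl | hzt
      · exact lt_of_le_of_ne hxz hne
      · have hyz : y ≤ z := (List.pairwise_cons.1 h.of_cons).1 z hzt
        refine lt_of_le_of_ne hxz ?_
        rintro rfl
        exact hne (le_antisymm ((List.pairwise_cons.1 h).1 y (by simp)) hyz)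
  | case4 x => simp

theorem pairwise_lt_sorted_of_nodup (L : List String) (hN : L.Nodup) :
    (PySem.List.sorted L (fun x => x) false).Pairwise (· < ·) := by
  have h1 : (PySem.List.sorted L (fun x => x) false).Pairwise (· ≤ ·) := by
    simpa using PySem.List.sorted_pairwise L (fun x => x)
  have h2 : (PySem.List.sorted L (fun x => x) false).Nodup :=
    (PySem.List.sorted_perm L (fun x => x) false).symm.nodup hN
  exact (h1.and h2).imp fun h => lt_of_le_of_ne h.1 h.2

theorem sorted_eq_pvMergeUnique (w b E : List String) (hw : w.Nodup)
    (hb : b.Pairwise (· < ·)) (hE : E.Pairwise (· < ·))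
    (hmem : ∀ x, x ∈ b ∨ x ∈ E ↔ x ∈ w) :
    PySem.List.sorted w (fun x => x) false = pvMergeUnique b E := by
  have hpw : (pvMergeUnique b E).Pairwise (· < ·) := pairwise_pvMergeUnique b E hb hE
  apply PySem.List.sorted_eq_of_perm_of_pairwise_lt
  · rw [List.perm_ext_iff_of_nodup (hpw.imp ne_of_lt) hw]
    intro z; rw [mem_pvMergeUnique]; exact hmem z
  · exact hpw

theorem augment_some_eq (cols : List String) :
    augment_columns_for_aliases_py (some cols) = augment_columns_for_aliases_py_alt (some cols) := by
  have hbase : ∀ z : String,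
      z ∈ pvDedupeSorted (PySem.List.sorted cols (fun x => x) false) ↔ z ∈ cols := by
    intro z; rw [mem_pvDedupeSorted, PySem.List.mem_sorted]
  have hbp : (pvDedupeSorted (PySem.List.sorted cols (fun x => x) false)).Pairwise (· < ·) :=
    pairwise_pvDedupeSorted _ (by simpa using PySem.List.sorted_pairwise cols (fun x => x))
  simp only [augment_columns_for_aliases_py, augment_columns_for_aliases_py_alt]
  by_cases h1 : "docente" ∈ cols <;> by_cases h2 : "asignatura" ∈ cols <;>
    by_cases h3 : "programa" ∈ cols <;>
  · simp only [pvAliasTable, List.foldl, PySem.Set.mem_add, PySem.Set.mem_ofList,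
      hbase, h1, h2, h3, if_true, if_false, List.nil_append, List.append_nil,
      String.reduceEq, or_false, false_or, or_true, true_or, if_pos, if_neg,
      iff_true, iff_false, not_false_eq_true, decide_true, decide_false, ite_true, ite_false]
    congr 1
    refine sorted_eq_pvMergeUnique _ _ _ ?_ hbp (pairwise_lt_sorted_of_nodup _ (by decide)) ?_
    · first
      | exact PySem.Set.nodup_ofList cols
      | (repeat' apply PySem.Set.nodup_add); exact PySem.Set.nodup_ofList cols
    · intro x
      simp only [hbase, PySem.List.mem_sorted, PySem.Set.mem_add, PySem.Set.mem_ofList,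
        List.mem_cons, List.not_mem_nil, List.mem_append]
      tauto

-- ===== VERDICT (by name: the statement is the Claim_ definition above) =====
theorem augment_columns_for_aliases_py_spec : Claim_equal_augment_columns_for_aliases_py := by
  intro columns _
  unfold Spec_augment_columns_for_aliases_py
  cases columns with
  | none => rfl
  | some cols => exact augment_some_eq cols
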